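-- pv_equiv track=rewrite | github.com/pak21/aoc2023 | 18/18.py | count
-- ===== SOURCE A (Python) =====
-- import collections
--
-- def count(active, horizontal_starts, horizontal_ends):
--     starts = [x for x in active[::2]]
--     ends = [x for x in active[1::2]]
--
--     actions = collections.defaultdict(list)
--     for x in starts:
--         actions[x].append('RANGE_START')
--     for x in ends:
--         actions[x+1].append('RANGE_END')
--     for x in horizontal_starts:
--         actions[x].append('HORIZONTAL_START')
--     for x in horizontal_ends:
--         actions[x+1].append('HORIZONTAL_END')
--
--     last_x = 0
--     active_count = 0
--     combined_count = 0
--     range_active = False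
--     horizontal_active = False
--     for x, ys in sorted(actions.items()):
--         if range_active:
--             active_count += x - last_x
--
--         if range_active or horizontal_active:
--             combined_count += x - last_x
--
--         for y in ys:
--             match y:
--                 case 'RANGE_START': range_active = True
--                 case 'RANGE_END': range_active = False
--                 case 'HORIZONTAL_START': horizontal_active = True
--                 case 'HORIZONTAL_END': horizontal_active = False
--
--         last_x = x
--
--     return active_count, combined_count
-- ===== SOURCE B (Python) =====
-- def count(active, horizontal_starts, horizontal_ends):
--     rs = active[::2]
--     re = [x + 1 for x in active[1::2]]
--     hs = list(horizontal_starts)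
--     he = [x + 1 for x in horizontal_ends]
--     keys = sorted(set(rs) | set(re) | set(hs) | set(he))
--
--     def on_at(starts, ends, k):
--         # state of the boolean after all events at coordinates <= k:
--         # the latest event coordinate decides; an end at it wins over a start
--         cand = [x for x in starts if x <= k] + [x for x in ends if x <= k]
--         if not cand:
--             return False
--         return max(cand) not in ends
--
--     a = c = 0
--     for k, k2 in zip(keys, keys[1:]):
--         r = on_at(rs, re, k)
--         h = on_at(hs, he, k)
--         if r:
--             a += k2 - k
--         if r or h:
--             c += k2 - k
--     return a, c
-- ===== Notes on version B (the rewrite author's own statement) =====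
-- stated objective: alternative
-- what changed: B replaces A's dict-of-action-lists and single stateful boolean-toggle sweep by a stateless decomposition: it sorts the deduplicated event coordinates once and, for each adjacent segment, decides 'range on' / 'horizontal on' independently by a max-query over the event coordinates (latest event at or before the segment start, end beats start), summing segment lengths directly.
import Mathlib
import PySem

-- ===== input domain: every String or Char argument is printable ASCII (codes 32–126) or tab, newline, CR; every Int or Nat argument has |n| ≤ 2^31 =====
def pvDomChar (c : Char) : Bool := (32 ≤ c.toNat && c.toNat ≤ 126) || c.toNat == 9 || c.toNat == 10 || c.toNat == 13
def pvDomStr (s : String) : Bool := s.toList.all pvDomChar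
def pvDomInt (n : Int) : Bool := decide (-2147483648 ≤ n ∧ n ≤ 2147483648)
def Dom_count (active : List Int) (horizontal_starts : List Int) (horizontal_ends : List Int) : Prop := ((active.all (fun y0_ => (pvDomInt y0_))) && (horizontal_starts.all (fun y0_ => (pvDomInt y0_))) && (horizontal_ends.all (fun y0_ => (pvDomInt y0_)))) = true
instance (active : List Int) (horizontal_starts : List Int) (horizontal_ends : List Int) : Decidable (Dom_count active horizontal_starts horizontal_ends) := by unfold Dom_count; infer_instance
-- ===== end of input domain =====

-- B replaces A's dict-of-action-lists + stateful boolean sweep by per-segment stateless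
-- max-queries over the sorted deduplicated event coordinates (objective: alternative).

-- ===== PORT A =====
-- inner loop body of A's 'for y in ys: match y: …' (unmatched strings are a no-op)
def countInner (rh : Bool × Bool) (y : String) : Bool × Bool :=
  if y = "RANGE_START" then (true, rh.2)
  else if y = "RANGE_END" then (false, rh.2)
  else if y = "HORIZONTAL_START" then (rh.1, true)
  else if y = "HORIZONTAL_END" then (rh.1, false)
  else rh

-- body of A's main 'for x, ys in sorted(actions.items())' loop; state = (last_x, active_count, combined_count, range_active, horizontal_active)
def countStep (s : Int × Int × Int × Bool × Bool) (p : Int × List String) : Int × Int × Int × Bool × Bool :=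
  let (last_x, active_count, combined_count, range_active, horizontal_active) := s
  let active_count := if range_active then active_count + (p.1 - last_x) else active_count
  let combined_count := if range_active || horizontal_active then combined_count + (p.1 - last_x) else combined_count
  let rh := p.2.foldl countInner (range_active, horizontal_active)
  (p.1, active_count, combined_count, rh.1, rh.2)

def count (active : List Int) (horizontal_starts : List Int) (horizontal_ends : List Int) : Int × Int :=
  -- active[::2] / active[1::2]: step 2 ≠ 0, so slice? is always some
  let starts := ((PySem.List.slice? active none none 2).getD []).map (fun x => x)
  let ends := ((PySem.List.slice? active (some 1) none 2).getD []).map (fun x => x)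
  let actions : PySem.Dict Int (List String) := PySem.Dict.empty
  let actions := starts.foldl (fun d x => d.modify x [] (· ++ ["RANGE_START"])) actions
  let actions := ends.foldl (fun d x => d.modify (x + 1) [] (· ++ ["RANGE_END"])) actions
  let actions := horizontal_starts.foldl (fun d x => d.modify x [] (· ++ ["HORIZONTAL_START"])) actions
  let actions := horizontal_ends.foldl (fun d x => d.modify (x + 1) [] (· ++ ["HORIZONTAL_END"])) actions
  -- dict keys are distinct, so Python's tuple sort of the items is a sort by the key
  let st := (PySem.List.sorted actions.items (fun p => p.1) false).foldl countStep (0, 0, 0, false, false)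
  (st.2.1, st.2.2.1)

-- ===== PORT B =====
-- B's on_at: state of the boolean after all events at coordinates <= k (latest coordinate decides, end wins)
def onAt (starts ends : List Int) (k : Int) : Bool :=
  let cand := starts.filter (fun x => decide (x ≤ k)) ++ ends.filter (fun x => decide (x ≤ k))
  match PySem.List.max? cand (fun x => x) with
  | none => false
  | some m => !(ends.contains m)

-- body of B's 'for k, k2 in zip(keys, keys[1:])' loop
def altStep (rs re hs he : List Int) (ac : Int × Int) (p : Int × Int) : Int × Int :=
  let r := onAt rs re p.1
  let h := onAt hs he p.1
  (if r then ac.1 + (p.2 - p.1) else ac.1, if r || h then ac.2 + (p.2 - p.1) else ac.2)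

def count_alt (active : List Int) (horizontal_starts : List Int) (horizontal_ends : List Int) : Int × Int :=
  let rs := (PySem.List.slice? active none none 2).getD []
  let re := ((PySem.List.slice? active (some 1) none 2).getD []).map (fun x => x + 1)
  let hs := horizontal_starts
  let he := horizontal_ends.map (fun x => x + 1)
  let keys := PySem.List.sorted (PySem.Set.union (PySem.Set.union (PySem.Set.union (PySem.Set.ofList rs) re) hs) he) (fun x => x) false
  (keys.zip keys.tail).foldl (altStep rs re hs he) (0, 0)

-- ===== PRECONDITION & SPEC =====
def Spec_count (active : List Int) (horizontal_starts : List Int) (horizontal_ends : List Int) (out : Int × Int) : Prop := out = count_alt active horizontal_starts horizontal_ends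
instance (active : List Int) (horizontal_starts : List Int) (horizontal_ends : List Int) (out : Int × Int) : Decidable (Spec_count active horizontal_starts horizontal_ends out) := by unfold Spec_count; infer_instance

-- ===== CLAIM (what is proved, stated in full; the proofs are below) =====
def Claim_equal_count : Prop := ∀ (active : List Int) (horizontal_starts : List Int) (horizontal_ends : List Int), Dom_count active horizontal_starts horizontal_ends → Spec_count active horizontal_starts horizontal_ends (count active horizontal_starts horizontal_ends)

-- ===== LEMMAS AND PROOFS =====

-- the action list A's dict holds at key k
def pvVal (rs re hs he : List Int) (k : Int) : List String :=
  List.replicate (rs.count k) "RANGE_START" ++ List.replicate (re.count k) "RANGE_END" ++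
  List.replicate (hs.count k) "HORIZONTAL_START" ++ List.replicate (he.count k) "HORIZONTAL_END"

-- A's boolean transition at a key
def pvTrans (starts ends : List Int) (b : Bool) (k : Int) : Bool :=
  if k ∈ ends then false else if k ∈ starts then true else b

-- A's sweep, abstracted over the sorted key list
def pvSweep (rs re hs he : List Int) (r h : Bool) (last a c : Int) : List Int → Int × Int
  | [] => (a, c)
  | k :: K =>
      pvSweep rs re hs he (pvTrans rs re r k) (pvTrans hs he h k) k
        (if r then a + (k - last) else a) (if r || h then c + (k - last) else c) K

-- B's sum of segment contributions, recursively
def pvSegs (rs re hs he : List Int) : List Int → Int × Int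
  | [] => (0, 0)
  | [_] => (0, 0)
  | k :: k' :: K =>
      let p := pvSegs rs re hs he (k' :: K)
      (if onAt rs re k then p.1 + (k' - k) else p.1,
       if onAt rs re k || onAt hs he k then p.2 + (k' - k) else p.2)

lemma foldl_altStep_eq_segs (rs re hs he : List Int) (K : List Int) (a c : Int) :
    (K.zip K.tail).foldl (altStep rs re hs he) (a, c)
      = (a + (pvSegs rs re hs he K).1, c + (pvSegs rs re hs he K).2) := by
  induction K generalizing a c with
  | nil => simp [pvSegs]
  | cons k K ih =>
    cases K with
    | nil => simp [pvSegs]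
    | cons k' K' =>
      simp only [List.tail_cons, List.zip_cons_cons, List.foldl_cons]
      have hstep : altStep rs re hs he (a, c) (k, k') =
          ((if onAt rs re k then a + (k' - k) else a),
           (if onAt rs re k || onAt hs he k then c + (k' - k) else c)) := rfl
      rw [hstep]
      have := ih (a := (if onAt rs re k then a + (k' - k) else a))
        (c := (if onAt rs re k || onAt hs he k then c + (k' - k) else c))
      simp only [List.tail_cons] at this
      rw [this]
      simp only [pvSegs, Prod.mk.injEq]
      constructor <;> split_ifs <;> ring

lemma innerFold_eq (rs re hs he : List Int) (k : Int) (r h : Bool) :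
    (pvVal rs re hs he k).foldl countInner (r, h)
      = (pvTrans rs re r k, pvTrans hs he h k) := by
  have hfix : ∀ (y : String) (v : Bool × Bool), countInner v y = v →
      ∀ (n : Nat), (List.replicate n y).foldl countInner v = v := by
    intro y v hv n
    induction n with
    | zero => simp
    | succ m ih => simp [List.replicate_succ, hv, ih]
  have hRS : ∀ (n : Nat) (rh : Bool × Bool),
      (List.replicate n "RANGE_START").foldl countInner rh = ((if n = 0 then rh.1 else true), rh.2) := by
    intro n rh
    cases n with
    | zero => simp
    | succ m =>
      simp only [List.replicate_succ, List.foldl_cons]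
      rw [show countInner rh "RANGE_START" = (true, rh.2) from rfl,
        hfix "RANGE_START" (true, rh.2) rfl]
      simp
  have hRE : ∀ (n : Nat) (rh : Bool × Bool),
      (List.replicate n "RANGE_END").foldl countInner rh = ((if n = 0 then rh.1 else false), rh.2) := by
    intro n rh
    cases n with
    | zero => simp
    | succ m =>
      simp only [List.replicate_succ, List.foldl_cons]
      rw [show countInner rh "RANGE_END" = (false, rh.2) from rfl,
        hfix "RANGE_END" (false, rh.2) rfl]
      simp
  have hHS : ∀ (n : Nat) (rh : Bool × Bool),
      (List.replicate n "HORIZONTAL_START").foldl countInner rh = (rh.1, (if n = 0 then rh.2 else true)) := by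
    intro n rh
    cases n with
    | zero => simp
    | succ m =>
      simp only [List.replicate_succ, List.foldl_cons]
      rw [show countInner rh "HORIZONTAL_START" = (rh.1, true) from rfl,
        hfix "HORIZONTAL_START" (rh.1, true) rfl]
      simp
  have hHE : ∀ (n : Nat) (rh : Bool × Bool),
      (List.replicate n "HORIZONTAL_END").foldl countInner rh = (rh.1, (if n = 0 then rh.2 else false)) := by
    intro n rh
    cases n with
    | zero => simp
    | succ m =>
      simp only [List.replicate_succ, List.foldl_cons]
      rw [show countInner rh "HORIZONTAL_END" = (rh.1, false) from rfl,
        hfix "HORIZONTAL_END" (rh.1, false) rfl]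
      simp
  simp only [pvVal, List.foldl_append, hRS, hRE, hHS, hHE, pvTrans]
  have hc : ∀ (l : List Int), (l.count k = 0) = (k ∉ l) := by
    intro l; simp [List.count_eq_zero]
  simp only [Prod.mk.injEq]
  constructor <;> split_ifs <;> simp_all [List.count_eq_zero]

lemma foldl_countStep_eq_sweep (rs re hs he : List Int) (K : List Int)
    (l a c : Int) (r h : Bool) :
    ((((K.map (fun k => (k, pvVal rs re hs he k))).foldl countStep (l, a, c, r, h)).2.1,
      ((K.map (fun k => (k, pvVal rs re hs he k))).foldl countStep (l, a, c, r, h)).2.2.1)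
      : Int × Int)
      = pvSweep rs re hs he r h l a c K := by
  induction K generalizing l a c r h with
  | nil => simp [pvSweep]
  | cons k K ih =>
    simp only [List.map_cons, List.foldl_cons]
    have hstep : countStep (l, a, c, r, h) (k, pvVal rs re hs he k) =
        (k, (if r then a + (k - l) else a), (if r || h then c + (k - l) else c),
         pvTrans rs re r k, pvTrans hs he h k) := by
      simp only [countStep, innerFold_eq]
    rw [hstep, ih, pvSweep]

lemma onAt_of_mem (s e : List Int) (k : Int) (hk : k ∈ s ++ e) :
    onAt s e k = !(e.contains k) := by
  have hkc : k ∈ s.filter (fun x => decide (x ≤ k)) ++ e.filter (fun x => decide (x ≤ k)) := by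
    simp only [List.mem_append, List.mem_filter, decide_eq_true_eq] at hk ⊢
    rcases hk with h | h
    · exact Or.inl ⟨h, le_refl k⟩
    · exact Or.inr ⟨h, le_refl k⟩
  simp only [onAt]
  cases hmax : PySem.List.max? (s.filter (fun x => decide (x ≤ k)) ++ e.filter (fun x => decide (x ≤ k))) (fun x => x) with
  | none =>
    rw [PySem.List.max?_eq_none_iff] at hmax
    rw [hmax] at hkc
    simp at hkc
  | some m =>
    have hm := PySem.List.max?_mem hmax
    have hle : m ≤ k := by
      simp only [List.mem_append, List.mem_filter, decide_eq_true_eq] at hm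
      rcases hm with ⟨_, h⟩ | ⟨_, h⟩ <;> exact h
    have hge : k ≤ m := PySem.List.max?_isMax hmax k hkc
    have hmk : m = k := le_antisymm hle hge
    subst hmk
    rfl

lemma onAt_of_gap (s e : List Int) (prev k : Int) (hpk : prev < k)
    (hk : k ∉ s ++ e) (hgap : ∀ x ∈ s ++ e, ¬(prev < x ∧ x < k)) :
    onAt s e k = onAt s e prev := by
  have hcong : ∀ l : List Int, l ⊆ s ++ e →
      l.filter (fun x => decide (x ≤ k)) = l.filter (fun x => decide (x ≤ prev)) := by
    intro l hl
    apply List.filter_congr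
    intro x hx
    simp only [decide_eq_decide]
    constructor
    · intro hxk
      by_contra hxp
      rw [Int.not_le] at hxp
      have hne : x ≠ k := fun hkk => hk (hkk ▸ hl hx)
      exact hgap x (hl hx) ⟨hxp, lt_of_le_of_ne hxk hne⟩
    · intro hxp; omega
  simp only [onAt, hcong s (List.subset_append_left s e), hcong e (List.subset_append_right s e)]

lemma onAt_first (s e : List Int) (k : Int) (hub : ∀ x ∈ s ++ e, x ≤ k → x = k) :
    onAt s e k = pvTrans s e false k := by
  by_cases hm : k ∈ s ++ e
  · rw [onAt_of_mem s e k hm]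
    simp only [pvTrans]
    by_cases hke : k ∈ e
    · simp [hke]
    · have hks : k ∈ s := by
        rcases List.mem_append.mp hm with h | h
        · exact h
        · exact absurd h hke
      simp [hke, hks]
  · simp only [List.mem_append, not_or] at hm
    have h1 : s.filter (fun x => decide (x ≤ k)) = [] := by
      rw [List.filter_eq_nil_iff]
      intro x hx
      simp only [decide_eq_true_eq]
      intro hxk
      exact hm.1 ((hub x (by simp [List.mem_append, hx]) hxk) ▸ hx)
    have h2 : e.filter (fun x => decide (x ≤ k)) = [] := by
      rw [List.filter_eq_nil_iff]
      intro x hx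
      simp only [decide_eq_true_eq]
      intro hxk
      exact hm.2 ((hub x (by simp [List.mem_append, hx]) hxk) ▸ hx)
    have hnone : PySem.List.max? ([] : List Int) (fun x => x) = none :=
      (PySem.List.max?_eq_none_iff _ _).mpr rfl
    simp [onAt, h1, h2, hnone, pvTrans, hm.1, hm.2]

lemma onAt_step (s e : List Int) (prev k : Int) (hpk : prev < k)
    (hgap : ∀ x ∈ s ++ e, ¬(prev < x ∧ x < k)) :
    onAt s e k = pvTrans s e (onAt s e prev) k := by
  by_cases hm : k ∈ s ++ e
  · rw [onAt_of_mem s e k hm]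
    simp only [pvTrans]
    by_cases hke : k ∈ e
    · simp [hke]
    · have hks : k ∈ s := by
        rcases List.mem_append.mp hm with h | h
        · exact h
        · exact absurd h hke
      simp [hke, hks]
  · rw [onAt_of_gap s e prev k hpk hm hgap]
    simp only [List.mem_append, not_or] at hm
    simp [pvTrans, hm.1, hm.2]

lemma sweep_eq_segs (rs re hs he : List Int) (K : List Int) (prev a c : Int)
    (hsort : (prev :: K).Pairwise (· < ·))
    (hcomp : ∀ x ∈ rs ++ re ++ hs ++ he, x ≤ prev ∨ x ∈ K) :
    pvSweep rs re hs he (onAt rs re prev) (onAt hs he prev) prev a c K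
      = (a + (pvSegs rs re hs he (prev :: K)).1, c + (pvSegs rs re hs he (prev :: K)).2) := by
  induction K generalizing prev a c with
  | nil => simp [pvSweep, pvSegs]
  | cons k K' ih =>
    have hpk : prev < k := (List.pairwise_cons.mp hsort).1 k (List.mem_cons_self)
    have hsort' : (k :: K').Pairwise (· < ·) := (List.pairwise_cons.mp hsort).2
    have hkK' : ∀ x ∈ K', k < x := (List.pairwise_cons.mp hsort').1
    have hgap : ∀ x ∈ rs ++ re ++ hs ++ he, ¬(prev < x ∧ x < k) := by
      intro x hx ⟨h1, h2⟩
      rcases hcomp x hx with h | h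
      · omega
      · rcases List.mem_cons.mp h with h | h
        · omega
        · exact absurd h2 (not_lt.mpr (le_of_lt (hkK' x h)))
    have hgapR : ∀ x ∈ rs ++ re, ¬(prev < x ∧ x < k) := by
      intro x hx
      exact hgap x (by simp only [List.mem_append] at hx ⊢; tauto)
    have hgapH : ∀ x ∈ hs ++ he, ¬(prev < x ∧ x < k) := by
      intro x hx
      exact hgap x (by simp only [List.mem_append] at hx ⊢; tauto)
    have hcomp' : ∀ x ∈ rs ++ re ++ hs ++ he, x ≤ k ∨ x ∈ K' := by
      intro x hx
      rcases hcomp x hx with h | h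
      · exact Or.inl (by omega)
      · rcases List.mem_cons.mp h with h | h
        · exact Or.inl (by omega)
        · exact Or.inr h
    have hstep : pvSweep rs re hs he (onAt rs re prev) (onAt hs he prev) prev a c (k :: K')
        = pvSweep rs re hs he (onAt rs re k) (onAt hs he k) k
            (if onAt rs re prev then a + (k - prev) else a)
            (if onAt rs re prev || onAt hs he prev then c + (k - prev) else c) K' := by
      rw [pvSweep, ← onAt_step rs re prev k hpk hgapR, ← onAt_step hs he prev k hpk hgapH]
    rw [hstep, ih k _ _ hsort' hcomp']
    simp only [pvSegs, Prod.mk.injEq]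
    constructor <;> split_ifs <;> ring


lemma set_update_ofList (xs ys : List Int) :
    PySem.Set.update (PySem.Set.ofList xs) ys = PySem.Set.ofList (xs ++ ys) := by
  simp [PySem.Set.update, PySem.Set.ofList, List.foldl_append]

lemma count_core (rs ed hsL heL : List Int) :
    (let d4 := heL.foldl (fun d x => d.modify (x + 1) [] (· ++ ["HORIZONTAL_END"]))
        (hsL.foldl (fun d x => d.modify x [] (· ++ ["HORIZONTAL_START"]))
          (ed.foldl (fun d x => d.modify (x + 1) [] (· ++ ["RANGE_END"]))
            (rs.foldl (fun d x => d.modify x [] (· ++ ["RANGE_START"]))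
              (PySem.Dict.empty : PySem.Dict Int (List String)))))
     let st := (PySem.List.sorted d4.items (fun p => p.1) false).foldl countStep (0, 0, 0, false, false)
     ((st.2.1, st.2.2.1) : Int × Int))
    = (let re := ed.map (fun x => x + 1)
       let he := heL.map (fun x => x + 1)
       let keys := PySem.List.sorted
         (PySem.Set.union (PySem.Set.union (PySem.Set.union (PySem.Set.ofList rs) re) hsL) he)
         (fun x => x) false
       (keys.zip keys.tail).foldl (altStep rs re hsL he) (0, 0)) := by
  have ekey2 : ∀ (d : PySem.Dict Int (List String)) (l : List Int) (tag : String),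
      l.foldl (fun d x => d.modify (x + 1) [] (· ++ [tag])) d
        = (l.map (fun x => x + 1)).foldl (fun d x => d.modify x [] (· ++ [tag])) d := by
    intro d l tag; rw [List.foldl_map]
  have efold : ∀ (d : PySem.Dict Int (List String)) (l : List Int) (tag : String),
      l.foldl (fun d x => d.modify x [] (· ++ [tag])) d
        = (l.map (fun x => (x, tag))).foldl (fun d p => d.modify p.1 [] (· ++ [p.2])) d := by
    intro d l tag; rw [List.foldl_map]
  have egetD : ∀ (d : PySem.Dict Int (List String)) (l : List Int) (tag : String) (kk : Int),
      (l.foldl (fun d x => d.modify x [] (· ++ [tag])) d).getD kk []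
        = d.getD kk [] ++ List.replicate (l.count kk) tag := by
    intro d l tag kk
    rw [efold, PySem.Dict.getD_foldl_modify_append]
    congr 1
    rw [List.filter_map, List.map_map]
    rw [show ((fun (x : Int × String) => x.2) ∘ fun x => (x, tag)) = fun (_ : Int) => tag from rfl]
    rw [show ((fun (p : Int × String) => p.1 == kk) ∘ fun x => (x, tag)) = fun x => x == kk from rfl]
    rw [List.map_const']
    congr 1
    exact (List.count_eq_length_filter).symm
  have ekeys : ∀ (d : PySem.Dict Int (List String)) (l : List Int) (tag : String),
      (l.foldl (fun d x => d.modify x [] (· ++ [tag])) d).keys = PySem.Set.update d.keys l :=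
    fun d l tag => PySem.Dict.keys_foldl_modify l [] (fun _ _ => (· ++ [tag])) d
  simp only []
  rw [ekey2 _ ed, ekey2 _ heL]
  set re := ed.map (fun x => x + 1) with hre
  set he := heL.map (fun x => x + 1) with hhe
  set d4 := he.foldl (fun d x => d.modify x [] (· ++ ["HORIZONTAL_END"]))
      (hsL.foldl (fun d x => d.modify x [] (· ++ ["HORIZONTAL_START"]))
        (re.foldl (fun d x => d.modify x [] (· ++ ["RANGE_END"]))
          (rs.foldl (fun d x => d.modify x [] (· ++ ["RANGE_START"]))
            (PySem.Dict.empty : PySem.Dict Int (List String))))) with hd4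
  have hkeys : d4.keys = PySem.Set.ofList (rs ++ re ++ hsL ++ he) := by
    rw [hd4]
    rw [ekeys, ekeys, ekeys, ekeys, PySem.Dict.keys_empty]
    rw [show PySem.Set.update ([] : List Int) rs = PySem.Set.ofList rs from rfl]
    rw [set_update_ofList, set_update_ofList, set_update_ofList]
  have hnodup : d4.keys.Nodup := by rw [hkeys]; exact PySem.Set.nodup_ofList _
  have hgetD : ∀ kk : Int, d4.getD kk [] = pvVal rs re hsL he kk := by
    intro kk
    rw [hd4, egetD, egetD, egetD, egetD, PySem.Dict.getD_empty]
    simp [pvVal, List.append_assoc]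
  set Ks := PySem.List.sorted (PySem.Set.ofList (rs ++ re ++ hsL ++ he)) (fun x => x) false with hKs
  have hpw : Ks.Pairwise (· < ·) := PySem.List.sorted_ofList_pairwise_lt _
  have hmemKs : ∀ x : Int, x ∈ Ks ↔ x ∈ rs ++ re ++ hsL ++ he := by
    intro x
    rw [hKs, PySem.List.mem_sorted, PySem.Set.mem_ofList]
  have hitems : PySem.List.sorted d4.items (fun p => p.1) false
      = Ks.map (fun kk => (kk, pvVal rs re hsL he kk)) := by
    apply PySem.List.sorted_eq_of_perm_of_pairwise_lt
    · have h1 : d4.items = d4.keys.map (fun kk => (kk, d4.getD kk [])) :=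
        PySem.Dict.items_eq_map_keys d4 hnodup []
      have h2 : d4.keys.map (fun kk => (kk, d4.getD kk []))
          = d4.keys.map (fun kk => (kk, pvVal rs re hsL he kk)) :=
        List.map_congr_left (fun kk _ => by rw [hgetD kk])
      rw [h1, h2, hkeys]
      exact List.Perm.map _ (PySem.List.sorted_perm _ _ _)
    · rw [List.pairwise_map]
      exact hpw
  have hBkeys : PySem.List.sorted
      (PySem.Set.union (PySem.Set.union (PySem.Set.union (PySem.Set.ofList rs) re) hsL) he)
      (fun x => x) false = Ks := by
    apply PySem.List.sorted_eq_sorted_of_perm _ _ _ (fun a b h => h)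
    apply (List.perm_ext_iff_of_nodup
      (PySem.Set.nodup_union _ _ (PySem.Set.nodup_union _ _
        (PySem.Set.nodup_union _ _ (PySem.Set.nodup_ofList _))))
      (PySem.Set.nodup_ofList _)).mpr
    intro x
    simp only [PySem.Set.mem_union, PySem.Set.mem_ofList, List.mem_append]
  rw [hitems, hBkeys]
  rw [foldl_countStep_eq_sweep, foldl_altStep_eq_segs]
  cases hK : Ks with
  | nil => simp [pvSweep, pvSegs]
  | cons k0 K =>
    rw [hK] at hpw
    have hk0K : ∀ x ∈ K, k0 < x := (List.pairwise_cons.mp hpw).1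
    have hmem' : ∀ x ∈ rs ++ re ++ hsL ++ he, x = k0 ∨ x ∈ K := by
      intro x hx
      exact List.mem_cons.mp ((hK ▸ (hmemKs x).mpr hx))
    have hubR : ∀ x ∈ rs ++ re, x ≤ k0 → x = k0 := by
      intro x hx hxk
      rcases hmem' x (by simp only [List.mem_append] at hx ⊢; tauto) with h | h
      · exact h
      · exact absurd hxk (not_le.mpr (hk0K x h))
    have hubH : ∀ x ∈ hsL ++ he, x ≤ k0 → x = k0 := by
      intro x hx hxk
      rcases hmem' x (by simp only [List.mem_append] at hx ⊢; tauto) with h | h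
      · exact h
      · exact absurd hxk (not_le.mpr (hk0K x h))
    have hcomp : ∀ x ∈ rs ++ re ++ hsL ++ he, x ≤ k0 ∨ x ∈ K := by
      intro x hx
      rcases hmem' x hx with h | h
      · exact Or.inl (le_of_eq h)
      · exact Or.inr h
    rw [pvSweep]
    simp only [Bool.false_or, if_neg (by simp : ¬ (false = true))]
    rw [show pvTrans rs re false k0 = onAt rs re k0 from (onAt_first rs re k0 hubR).symm]
    rw [show pvTrans hsL he false k0 = onAt hsL he k0 from (onAt_first hsL he k0 hubH).symm]
    rw [sweep_eq_segs rs re hsL he K k0 0 0 hpw hcomp]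

-- ===== VERDICT (by name: the statement is the Claim_ definition above) =====
theorem count_spec : Claim_equal_count := by
  intro active hstarts hends _
  unfold Spec_count count count_alt
  simp only [List.map_id']
  exact count_core ((PySem.List.slice? active none none 2).getD [])
    ((PySem.List.slice? active (some 1) none 2).getD []) hstarts hends
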